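-- pv_equiv track=rewrite | github.com/TheOnur/HackerRankQuestions | shifted_array.py | shifted_array
-- ===== SOURCE A (Python) =====
-- def shifted_array(arr, k):
--     shifted = []
--     n = len(arr)
--     index = 0
--
--     for item in arr:
--         new_index = (index + k) % n
--         shifted.insert(new_index , item)
--         index = index + 1
--
--     return shifted
-- ===== SOURCE B (Python) =====
-- def shifted_array(arr, k):
--     n = len(arr)
--     if n == 0:
--         return []
--     cut = n - k % n
--     return arr[cut:] + arr[:cut]
-- ===== Notes on version B (the rewrite author's own statement) =====
-- stated objective: faster
-- what changed: Replaced the loop of O(n) list.insert calls (quadratic overall) by the closed form it computes: a right rotation by k mod n done with two slices.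
import Mathlib
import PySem

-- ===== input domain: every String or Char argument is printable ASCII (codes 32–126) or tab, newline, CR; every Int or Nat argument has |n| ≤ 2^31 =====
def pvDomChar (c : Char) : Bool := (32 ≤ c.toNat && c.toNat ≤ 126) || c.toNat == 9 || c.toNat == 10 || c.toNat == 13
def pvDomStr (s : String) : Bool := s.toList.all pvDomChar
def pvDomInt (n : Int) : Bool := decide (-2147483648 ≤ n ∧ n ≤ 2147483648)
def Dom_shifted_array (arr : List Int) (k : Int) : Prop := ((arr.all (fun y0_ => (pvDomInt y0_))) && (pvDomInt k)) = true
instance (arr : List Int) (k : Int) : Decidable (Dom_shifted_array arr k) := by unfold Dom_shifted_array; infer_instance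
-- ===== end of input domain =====

-- B replaces A's quadratic sequence of list.insert calls by the right rotation (by k mod n) it computes, via two slices.


-- ===== PORT A =====
-- loop body of A: shifted.insert((index + k) % n, item); index += 1
def shiftStep (n k : Int) (st : List Int × Int) (item : Int) : List Int × Int :=
  (PySem.List.insert st.1 (PySem.Int.mod (st.2 + k) n) item, st.2 + 1)

def shifted_array (arr : List Int) (k : Int) : List Int :=
  (arr.foldl (shiftStep (arr.length : Int) k) (([] : List Int), (0 : Int))).1

-- ===== PORT B =====
def shifted_array_alt (arr : List Int) (k : Int) : List Int :=
  let n : Int := (arr.length : Int)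
  if n = 0 then []
  else
    let cut : Int := n - PySem.Int.mod k n
    PySem.List.slice arr (some cut) none ++ PySem.List.slice arr none (some cut)

-- ===== PRECONDITION & SPEC =====
def Spec_shifted_array (arr : List Int) (k : Int) (out : List Int) : Prop := out = shifted_array_alt arr k
instance (arr : List Int) (k : Int) (out : List Int) : Decidable (Spec_shifted_array arr k out) := by unfold Spec_shifted_array; infer_instance

-- ===== CLAIM (what is proved, stated in full; the proofs are below) =====
def Claim_equal_shifted_array : Prop := ∀ (arr : List Int) (k : Int), Dom_shifted_array arr k → Spec_shifted_array arr k (shifted_array arr k)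

-- ===== LEMMAS AND PROOFS =====

-- Python xs.insert(i, v) for a nonnegative i: clamped take/drop insertion.
theorem insert_toNat_of_nonneg {α : Type} (xs : List α) (i : Int) (v : α) (h : 0 ≤ i) :
    PySem.List.insert xs i v = xs.take i.toNat ++ v :: xs.drop i.toNat := by
  simp only [PySem.List.insert, PySem.List.sliceIndices]
  split_ifs with h1 <;> try omega
  have hm : (min i (xs.length : Int)).toNat = min i.toNat xs.length := by omega
  rw [hm]
  rcases le_total i.toNat xs.length with hc | hc
  · rw [min_eq_left hc]
  · rw [min_eq_right hc, List.take_of_length_le hc, List.take_length,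
      List.drop_length, List.drop_eq_nil_of_le hc]

-- the invariant state after i insertions, where c = n - (k mod n)
def shiftState (arr : List Int) (c i : Nat) : List Int :=
  (arr.drop c).take (i - c) ++ arr.take (min i c)

theorem shiftState_length (arr : List Int) (c i : Nat) (hc : c ≤ arr.length)
    (hi : i ≤ arr.length) : (shiftState arr c i).length = i := by
  simp [shiftState]
  omega

theorem mod_shift (k n i : Int) (hn : 0 < n) :
    PySem.Int.mod ((i : Int) + k) n = (i + PySem.Int.mod k n) % n := by
  rw [PySem.Int.mod_eq_emod_of_pos hn, PySem.Int.mod_eq_emod_of_pos hn]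
  conv_lhs => rw [← Int.mul_ediv_add_emod k n]
  rw [show i + (n * (k / n) + k % n) = i + k % n + n * (k / n) by ring,
    Int.add_mul_emod_self_left]

theorem shiftStep_state (arr : List Int) (k : Int) (r i : Nat)
    (hn : 0 < arr.length) (hi : i < arr.length)
    (hr : PySem.Int.mod k (arr.length : Int) = (r : Int)) (hrn : r < arr.length) :
    shiftStep (arr.length : Int) k (shiftState arr (arr.length - r) i, (i : Int)) arr[i] =
      (shiftState arr (arr.length - r) (i + 1), (((i + 1 : Nat)) : Int)) := by
  have hmod := mod_shift k (arr.length : Int) (i : Int) (by exact_mod_cast hn)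
  set n := arr.length with hn'
  set c := n - r with hc'
  unfold shiftStep
  simp only [hmod, hr, Prod.mk.injEq]
  by_cases hcase : i + r < n
  · -- index (i + r) ≥ current length i : append at the end
    have hv : ((i : Int) + (r : Int)) % (n : Int) = ((i + r : Nat) : Int) := by
      rw [Int.emod_eq_of_lt (by positivity) (by exact_mod_cast hcase)]
      push_cast; ring
    rw [hv, insert_toNat_of_nonneg _ _ _ (by positivity)]
    refine ⟨?_, rfl⟩
    have hlen : (shiftState arr c i).length = i := shiftState_length arr c i (by omega) (by omega)
    have hge : (shiftState arr c i).length ≤ ((i + r : Nat) : Int).toNat := by omega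
    rw [List.take_of_length_le hge, List.drop_eq_nil_of_le hge]
    -- state ++ [arr[i]] = next state;  here i < c
    have hic : i < c := by omega
    simp only [shiftState, Nat.sub_eq_zero_of_le (le_of_lt hic),
      Nat.sub_eq_zero_of_le (by omega : i + 1 ≤ c), List.take_zero, List.nil_append,
      min_eq_left (le_of_lt hic), min_eq_left (by omega : i + 1 ≤ c)]
    rw [List.take_add_one, List.getElem?_eq_getElem hi]
    rfl
  · -- index i + r - n = i - c < current length i : insert inside
    have hic : c ≤ i := by omega
    have hv : ((i : Int) + (r : Int)) % (n : Int) = ((i - c : Nat) : Int) := by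
      rw [show (i : Int) + (r : Int) = ((i - c : Nat) : Int) + (n : Int) * 1 by omega,
        Int.add_mul_emod_self_left, Int.emod_eq_of_lt (by positivity) (by exact_mod_cast (by omega : i - c < n))]
    rw [hv, insert_toNat_of_nonneg _ _ _ (by positivity)]
    have hA : ((arr.drop c).take (i - c)).length = i - c := by
      simp; omega
    have htoNat : ((i - c : Nat) : Int).toNat = i - c := by omega
    rw [htoNat]
    refine ⟨?_, by omega⟩
    have hTake : List.take (i - c) (shiftState arr c i) = (arr.drop c).take (i - c) := by
      unfold shiftState
      rw [List.take_append_of_le_length (le_of_eq hA.symm), List.take_take, min_self]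
    have hDrop : List.drop (i - c) (shiftState arr c i) = arr.take (min i c) := by
      unfold shiftState
      rw [List.drop_append_of_le_length (le_of_eq hA.symm),
        List.drop_eq_nil_of_le (le_of_eq hA), List.nil_append]
    rw [hTake, hDrop]
    have h3 : (arr.drop c).take (i + 1 - c) = (arr.drop c).take (i - c) ++ [arr[i]] := by
      have hci : c + (i - c) = i := by omega
      rw [show i + 1 - c = (i - c) + 1 by omega, List.take_add_one,
        List.getElem?_drop, hci, List.getElem?_eq_getElem hi]
      rfl
    simp only [shiftState, min_eq_right hic, min_eq_right (by omega : c ≤ i + 1), h3,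
      List.append_assoc, List.cons_append, List.nil_append]

theorem shift_loop (arr : List Int) (k : Int) (r : Nat)
    (hn : 0 < arr.length)
    (hr : PySem.Int.mod k (arr.length : Int) = (r : Int)) (hrn : r < arr.length) :
    ∀ (j i : Nat), i + j = arr.length →
      List.foldl (shiftStep (arr.length : Int) k)
          (shiftState arr (arr.length - r) i, (i : Int)) (arr.drop i) =
        (shiftState arr (arr.length - r) arr.length, (arr.length : Int)) := by
  intro j
  induction j with
  | zero =>
    intro i hij
    rw [show i = arr.length by omega, List.drop_length, List.foldl_nil]
  | succ m ih =>
    intro i hij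
    have hi : i < arr.length := by omega
    rw [List.drop_eq_getElem_cons hi, List.foldl_cons,
      shiftStep_state arr k r i hn hi hr hrn]
    exact ih (i + 1) (by omega)

-- ===== VERDICT (by name: the statement is the Claim_ definition above) =====
theorem shifted_array_spec : Claim_equal_shifted_array := by
  intro arr k _
  unfold Spec_shifted_array shifted_array shifted_array_alt
  rcases Nat.eq_zero_or_pos arr.length with h0 | hn
  · rw [List.eq_nil_of_length_eq_zero h0]
    simp
  · have hne : ((arr.length : Int)) ≠ 0 := by omega
    simp only [if_neg hne]
    have hpos : (0 : Int) < (arr.length : Int) := by exact_mod_cast hn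
    have hr0 : 0 ≤ PySem.Int.mod k (arr.length : Int) := by
      rw [PySem.Int.mod_eq_emod_of_pos hpos]; exact Int.emod_nonneg _ (by omega)
    have hrlt : PySem.Int.mod k (arr.length : Int) < (arr.length : Int) := by
      rw [PySem.Int.mod_eq_emod_of_pos hpos]; exact Int.emod_lt_of_pos _ hpos
    set r : Nat := (PySem.Int.mod k (arr.length : Int)).toNat with hrdef
    have hr : PySem.Int.mod k (arr.length : Int) = (r : Int) := by omega
    have hrn : r < arr.length := by omega
    have hmain := shift_loop arr k r hn hr hrn arr.length 0 (by omega)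
    rw [List.drop_zero] at hmain
    have hstart : (([] : List Int), (0 : Int)) = (shiftState arr (arr.length - r) 0, ((0 : Nat) : Int)) := by
      simp [shiftState]
    rw [hstart, hmain]
    -- final state = the two slices
    have hcut : (arr.length : Int) - PySem.Int.mod k (arr.length : Int) = ((arr.length - r : Nat) : Int) := by
      omega
    rw [hcut, PySem.List.slice_from_natCast, PySem.List.slice_to_natCast]
    simp only [shiftState]
    rw [min_eq_right (by omega : arr.length - r ≤ arr.length)]
    congr 1
    exact List.take_of_length_le (by simp)
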